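-- pv_equiv track=rewrite | github.com/rlheureu/arctic | utils/gen_utils.py | dictobjslist_to_mapbykey
-- ===== SOURCE A (Python) =====
-- def dictobjslist_to_mapbykey(key_name='id', dictobjs=None, force=False):
--     """
--     will map object by specified key_name
--     if force is set to True it will return a list of any objects found with the key. if force
--     is False it will return None if the key is missing from any object
--     """
--
--     rv = {}
--
--     if dictobjs:
--         for dictob in dictobjs:
--             val = dictob.get(key_name)
--             if not val and not force:
--                 return None
--             else:
--                 rv[val] = dictob
--
--
--     return rv
-- ===== SOURCE B (Python) =====
-- def dictobjslist_to_mapbykey(key_name='id', dictobjs=None, force=False):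
--     """Two-pass rewrite: empty check, then (when not force) a single falsy-key scan,
--     then one dict comprehension (last-wins on duplicates)."""
--     if not dictobjs:
--         return {}
--     if not force and any(not d.get(key_name) for d in dictobjs):
--         return None
--     return {d.get(key_name): d for d in dictobjs}
-- ===== Notes on version B (the rewrite author's own statement) =====
-- stated objective: simpler
-- what changed: Replaces A's single loop with interleaved early-return and dict mutation by three separate phases: an empty-input guard, one any() scan for a falsy key value (only when force is False), and a dict comprehension that builds the whole map at once.
-- outside the precondition, e.g. on dictobjslist_to_mapbykey('id', [{}], True): A returns {None: {}}, B returns {None: {}}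
import Mathlib
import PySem

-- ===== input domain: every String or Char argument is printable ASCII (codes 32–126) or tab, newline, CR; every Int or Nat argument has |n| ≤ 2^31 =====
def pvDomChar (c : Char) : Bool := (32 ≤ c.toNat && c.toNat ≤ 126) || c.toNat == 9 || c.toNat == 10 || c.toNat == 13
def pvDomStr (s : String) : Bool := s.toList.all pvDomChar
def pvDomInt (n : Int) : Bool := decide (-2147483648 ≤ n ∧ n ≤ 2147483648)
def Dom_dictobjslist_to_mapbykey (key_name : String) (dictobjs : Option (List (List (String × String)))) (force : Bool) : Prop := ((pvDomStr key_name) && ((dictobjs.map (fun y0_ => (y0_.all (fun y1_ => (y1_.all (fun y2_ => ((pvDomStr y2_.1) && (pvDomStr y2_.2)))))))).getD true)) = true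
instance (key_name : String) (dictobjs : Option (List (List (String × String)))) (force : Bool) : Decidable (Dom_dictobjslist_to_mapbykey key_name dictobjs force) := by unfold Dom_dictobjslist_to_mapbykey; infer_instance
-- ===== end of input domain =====

-- B restructures A's single combined loop into three phases (empty guard, falsy-key scan, map comprehension); objective: simpler.


-- ===== PORT A =====
-- d.get(key_name): first-match lookup in the association list (shared Python built-in, used by both ports)
def pvGetKey (d : List (String × String)) (k : String) : Option String :=
  (PySem.Dict.mk d).get? k

-- A's for-loop with its early return; `val.getD ""` is the inserted key (outside Pre_, when
-- force=True and the key is missing, Python's key None is not a String, so "" is a placeholder there)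
def pvLoopA (key_name : String) (force : Bool)
    (l : List (List (String × String)))
    (rv : PySem.Dict String (List (String × String))) :
    Option (List (String × List (String × String))) :=
  match l with
  | [] => some rv.items
  | d :: rest =>
      let val := pvGetKey d key_name
      if ((val.getD "" == "") && !force) then none
      else pvLoopA key_name force rest (rv.insert (val.getD "") d)

def dictobjslist_to_mapbykey (key_name : String) (dictobjs : Option (List (List (String × String)))) (force : Bool) : Option (List (String × List (String × String))) :=
  let rv : PySem.Dict String (List (String × String)) := PySem.Dict.empty
  match dictobjs with
  | none => some rv.items
  | some l => if l.isEmpty then some rv.items else pvLoopA key_name force l rv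

-- ===== PORT B =====
def dictobjslist_to_mapbykey_alt (key_name : String) (dictobjs : Option (List (List (String × String)))) (force : Bool) : Option (List (String × List (String × String))) :=
  match dictobjs with
  | none => some []
  | some l =>
      if l.isEmpty then some []
      else if (!force && l.any (fun d => (pvGetKey d key_name).getD "" == "")) then none
      else some ((l.foldl (fun rv d => rv.insert ((pvGetKey d key_name).getD "") d)
                    (PySem.Dict.empty : PySem.Dict String (List (String × String)))).items)

-- ===== PRECONDITION & SPEC =====
-- Pre_ excludes only inputs where force=True and some dict lacks key_name: there Python A returns a
-- dict with key None, which is not a value of the declared type dict[str, dict[str, str]].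
def Pre_dictobjslist_to_mapbykey (key_name : String) (dictobjs : Option (List (List (String × String)))) (force : Bool) : Prop :=
  force = true → ∀ d ∈ dictobjs.getD [], ((PySem.Dict.mk d).get? key_name).isSome = true
instance (key_name : String) (dictobjs : Option (List (List (String × String)))) (force : Bool) : Decidable (Pre_dictobjslist_to_mapbykey key_name dictobjs force) := by unfold Pre_dictobjslist_to_mapbykey; infer_instance
def pvWitness_dictobjslist_to_mapbykey : String × (Option (List (List (String × String)))) × Bool := ("id", some [[("id", "x")], [("id", "y"), ("a", "b")]], true)
def Spec_dictobjslist_to_mapbykey (key_name : String) (dictobjs : Option (List (List (String × String)))) (force : Bool) (out : Option (List (String × List (String × String)))) : Prop := out = dictobjslist_to_mapbykey_alt key_name dictobjs force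
instance (key_name : String) (dictobjs : Option (List (List (String × String)))) (force : Bool) (out : Option (List (String × List (String × String)))) : Decidable (Spec_dictobjslist_to_mapbykey key_name dictobjs force out) := by unfold Spec_dictobjslist_to_mapbykey; infer_instance

-- ===== CLAIM (what is proved, stated in full; the proofs are below) =====
def Claim_equal_dictobjslist_to_mapbykey : Prop := ∀ (key_name : String) (dictobjs : Option (List (List (String × String)))) (force : Bool), Dom_dictobjslist_to_mapbykey key_name dictobjs force → Pre_dictobjslist_to_mapbykey key_name dictobjs force → Spec_dictobjslist_to_mapbykey key_name dictobjs force (dictobjslist_to_mapbykey key_name dictobjs force)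

-- ===== LEMMAS AND PROOFS =====
theorem pvLoopA_eq (key_name : String) (force : Bool)
    (l : List (List (String × String))) (rv : PySem.Dict String (List (String × String))) :
    pvLoopA key_name force l rv =
      if (!force && l.any (fun d => (pvGetKey d key_name).getD "" == "")) then none
      else some ((l.foldl (fun rv d => rv.insert ((pvGetKey d key_name).getD "") d) rv).items) := by
  induction l generalizing rv with
  | nil => simp [pvLoopA]
  | cons d rest ih =>
      by_cases hf : ((pvGetKey d key_name).getD "" == "") && !force
      · simp_all [pvLoopA]
      · simp only [pvLoopA, hf, if_neg, List.any_cons, List.foldl_cons, ih]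
        simp only [Bool.and_eq_true, Bool.not_eq_true'] at hf ⊢
        rcases Bool.eq_false_or_eq_true ((pvGetKey d key_name).getD "" == "") with h | h <;>
          simp [h] at hf ⊢ <;> simp_all

-- ===== VERDICT (by name: the statement is the Claim_ definition above) =====
theorem dictobjslist_to_mapbykey_spec : Claim_equal_dictobjslist_to_mapbykey := by
  intro key_name dictobjs force _ _
  unfold Spec_dictobjslist_to_mapbykey dictobjslist_to_mapbykey dictobjslist_to_mapbykey_alt
  cases dictobjs with
  | none => rfl
  | some l =>
      by_cases hl : l.isEmpty
      · simp only [hl, if_pos]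
        rfl
      · simp only [hl, if_neg, Bool.false_eq_true, not_false_iff]
        rw [pvLoopA_eq]
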